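-- pv_equiv track=rewrite | github.com/yeonwoo1125/cospro-python-study | yeonwoo/answer/가장_오래_일한_사람을_구해주세요.py | solution
-- ===== SOURCE A (Python) =====
-- def solution(time_table, n):
-- 	answer = 0
-- 	a = [ 0 for i in range(n)]
-- 	for i, t in enumerate(time_table):
-- 		a[i % n] += time_table[i]
--
-- 	answer = a[0]
-- 	for t in a:
-- 		answer = max(t, answer)
--
-- 	return answer
-- ===== SOURCE B (Python) =====
-- def solution(time_table, n):
--     m = len(time_table)
--     return max(sum(time_table[i] for i in range(j, m, n)) for j in range(n))
-- ===== Notes on version B (the rewrite author's own statement) =====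
-- stated objective: idiomatic
-- what changed: Residue-major strided sums (for each j in range(n), sum time_table[j::n] via range(j, m, n)) fed to the built-in max replace A's mod-indexed bucket array plus a manual running-max scan.
import Mathlib
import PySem

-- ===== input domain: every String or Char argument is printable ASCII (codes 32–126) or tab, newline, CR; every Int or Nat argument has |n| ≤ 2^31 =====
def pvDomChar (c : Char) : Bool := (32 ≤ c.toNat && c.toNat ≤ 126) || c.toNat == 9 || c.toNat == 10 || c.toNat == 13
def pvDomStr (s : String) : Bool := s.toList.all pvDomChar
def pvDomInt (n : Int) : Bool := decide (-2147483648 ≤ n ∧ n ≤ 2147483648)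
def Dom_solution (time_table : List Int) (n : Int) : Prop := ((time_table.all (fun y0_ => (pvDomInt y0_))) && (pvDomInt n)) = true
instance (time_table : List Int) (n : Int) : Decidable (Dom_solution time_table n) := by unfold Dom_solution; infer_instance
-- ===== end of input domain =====

-- B replaces A's mod-indexed bucket array and manual running-max by residue-major strided
-- sums fed to the built-in max (idiomatic decomposition, same cost).

-- ===== PORT A =====
-- a = [0 for i in range(n)]; for i, t in enumerate(time_table): a[i % n] += time_table[i];
-- answer = a[0]; for t in a: answer = max(t, answer); return answer
def solution (time_table : List Int) (n : Int) : Int :=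
  let a0 : List Int := (PySem.List.pyRange 0 n 1).map (fun _ => (0 : Int))
  let a : List Int := time_table.zipIdx.foldl
    (fun a p =>
      a.set (PySem.Int.mod (p.2 : Int) n).toNat
        (PySem.List.pyGetD a (PySem.Int.mod (p.2 : Int) n) 0
          + PySem.List.pyGetD time_table (p.2 : Int) 0)) a0
  let answer := PySem.List.pyGetD a 0 0
  a.foldl (fun answer t => max t answer) answer

-- ===== PORT B =====
-- m = len(time_table); return max(sum(time_table[i] for i in range(j, m, n)) for j in range(n))
def solution_alt (time_table : List Int) (n : Int) : Int :=
  let m : Int := (time_table.length : Int)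
  let sums : List Int := (PySem.List.pyRange 0 n 1).map
    (fun j => ((PySem.List.pyRange j m n).map (fun i => PySem.List.pyGetD time_table i 0)).sum)
  (PySem.List.max? sums (fun x => x)).getD 0

-- ===== PRECONDITION & SPEC =====
-- Pre_ excludes n ≤ 0, where A raises (ZeroDivisionError for n = 0, IndexError otherwise)
-- and B raises ValueError (max of an empty sequence); A returns on every input with n ≥ 1.
def Pre_solution (time_table : List Int) (n : Int) : Prop := 1 ≤ n
instance (time_table : List Int) (n : Int) : Decidable (Pre_solution time_table n) := by unfold Pre_solution; infer_instance
def pvWitness_solution : List Int × Int := ([4, 2, 7, 1], 2)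
def Spec_solution (time_table : List Int) (n : Int) (out : Int) : Prop := out = solution_alt time_table n
instance (time_table : List Int) (n : Int) (out : Int) : Decidable (Spec_solution time_table n out) := by unfold Spec_solution; infer_instance

-- ===== CLAIM (what is proved, stated in full; the proofs are below) =====
def Claim_equal_solution : Prop := ∀ (time_table : List Int) (n : Int), Dom_solution time_table n → Pre_solution time_table n → Spec_solution time_table n (solution time_table n)

-- ===== LEMMAS AND PROOFS =====

-- the sum A's bucket j accumulates: elements of tt at indices ≡ j (mod N)
def pvBucket (tt : List Int) (N j : Nat) : Int :=
  (((List.range tt.length).filter (fun i => i % N == j)).map (fun i => tt.getD i 0)).sum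

def pvCnt (N j m : Nat) : Nat := (List.range m).countP (fun i => i % N == j)

lemma pv_eq_zero_of_mul_lt {N c : Nat} (h : N * c < N) : c = 0 := by
  rcases c with _ | c
  · rfl
  · exfalso
    have : N ≤ N * (c + 1) := Nat.le_mul_of_pos_right _ (Nat.succ_pos c)
    omega

-- the indices < m congruent to j mod N form the arithmetic progression j, j+N, …
lemma pv_filter_prog (N j : Nat) (hN : 0 < N) (hj : j < N) (m : Nat) :
    (List.range m).filter (fun i => i % N == j)
      = (List.range (pvCnt N j m)).map (fun k => j + N * k)
    ∧ m ≤ j + N * pvCnt N j m ∧ j + N * pvCnt N j m < m + N := by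
  induction m with
  | zero => simp [pvCnt]; omega
  | succ m ih =>
    obtain ⟨hlist, hlo, hhi⟩ := ih
    by_cases hm : m % N = j
    · have hdm : N * (m / N) + m % N = m := Nat.div_add_mod m N
      have hmul1 : N * (m / N + 1) = N * (m / N) + N := by ring
      have hcq : pvCnt N j m = m / N := by
        have h1 : m / N ≤ pvCnt N j m := by
          have hle : N * (m / N) ≤ N * pvCnt N j m := by omega
          exact Nat.le_of_mul_le_mul_left hle hN
        have h2 : pvCnt N j m < m / N + 1 := by
          have hlt : N * pvCnt N j m < N * (m / N + 1) := by omega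
          exact Nat.lt_of_mul_lt_mul_left hlt
        omega
      have heq : j + N * pvCnt N j m = m := by
        have : N * pvCnt N j m = N * (m / N) := by rw [hcq]
        omega
      have hcnt : pvCnt N j (m + 1) = pvCnt N j m + 1 := by
        simp [pvCnt, List.range_succ, List.countP_append, hm]
      have hmul2 : N * (pvCnt N j m + 1) = N * pvCnt N j m + N := by ring
      refine ⟨?_, by rw [hcnt]; omega, by rw [hcnt]; omega⟩
      rw [List.range_succ, List.filter_append, hlist, hcnt, List.range_succ, List.map_append]
      simp [hm, heq]
    · have hne : m ≠ j + N * pvCnt N j m := by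
        intro h
        apply hm
        rw [h, Nat.add_mul_mod_self_left, Nat.mod_eq_of_lt hj]
      have hcnt : pvCnt N j (m + 1) = pvCnt N j m := by
        simp [pvCnt, List.range_succ, List.countP_append, hm]
      refine ⟨?_, by rw [hcnt]; omega, by rw [hcnt]; omega⟩
      rw [List.range_succ, List.filter_append, hlist, hcnt]
      simp [hm]

-- one appended element adds to exactly one bucket
lemma pvBucket_append (tt : List Int) (x : Int) (N j : Nat) :
    pvBucket (tt ++ [x]) N j
      = pvBucket tt N j + (if tt.length % N == j then x else 0) := by
  unfold pvBucket
  rw [List.length_append, List.length_singleton, List.range_succ, List.filter_append]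
  rw [List.map_append, List.sum_append]
  congr 1
  · congr 1
    apply List.map_congr_left
    intro i hi
    have : i < tt.length := by
      have := List.mem_range.mp (List.mem_of_mem_filter hi)
      exact this
    rw [List.getD_append _ _ _ _ this]
  · by_cases h : tt.length % N = j
    · simp [h, List.getD]
    · simp [h]

-- updating a map-over-range at one position
lemma pv_set_map_range (N j : Nat) (f : Nat → Int) (v : Int) :
    ((List.range N).map f).set j v
      = (List.range N).map (fun j' => if j' = j then v else f j') := by
  apply List.ext_getElem
  · simp
  · intro i h1 h2
    simp only [List.getElem_set, List.getElem_map, List.getElem_range]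
    split_ifs with h h' h'
    · rfl
    · omega
    · omega
    · rfl

-- A's accumulation loop, characterised: starting from any map-over-range state
lemma pv_loopA (N : Nat) (hN : 0 < N) (tt : List Int) (f : Nat → Int) :
    tt.zipIdx.foldl
        (fun a p => a.set (p.2 % N) (a.getD (p.2 % N) 0 + p.1))
        ((List.range N).map f)
      = (List.range N).map (fun j => f j + pvBucket tt N j) := by
  induction tt using List.reverseRecOn generalizing f with
  | nil => simp [pvBucket]
  | append_singleton tt x ih =>
    rw [List.zipIdx_append, List.foldl_append, ih]
    have hj0 : tt.length % N < N := Nat.mod_lt _ hN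
    simp only [List.zipIdx, List.foldl_cons, List.foldl_nil, Nat.zero_add]
    rw [PySem.List.getD_map_range _ _ _ _ hj0, pv_set_map_range]
    apply List.map_congr_left
    intro j hj
    rw [pvBucket_append]
    by_cases h : j = tt.length % N
    · simp [h]; ring
    · have : ¬ (tt.length % N = j) := fun hh => h hh.symm
      simp [h, this]

-- the bucket sum equals B's strided-range sum
lemma pv_bucket_eq_stride (tt : List Int) (N j : Nat) (hN : 0 < N) (hj : j < N) :
    pvBucket tt N j
      = ((PySem.List.pyRange (j : Int) (tt.length : Int) (N : Int)).map
          (fun i => PySem.List.pyGetD tt i 0)).sum := by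
  obtain ⟨hlist, hlo, hhi⟩ := pv_filter_prog N j hN hj tt.length
  have hNpos : (0 : Int) < (N : Int) := by exact_mod_cast hN
  rw [PySem.List.pyRange_of_pos _ _ hNpos]
  set m := tt.length with hm
  set c := pvCnt N j m with hc
  have hcB : (if (j : Int) < (m : Int) then
      (((m : Int) - (j : Int) + (N : Int) - 1) / (N : Int)).toNat else 0) = c := by
    by_cases hjm : j < m
    · have hX : (((m - j + N - 1 : Nat)) : Int) = (m : Int) - (j : Int) + (N : Int) - 1 := by
        omega
      have hdiv : (m - j + N - 1) / N = c := by
        apply Nat.div_eq_of_lt_le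
        · rw [Nat.mul_comm c N]; omega
        · rw [Nat.add_mul, Nat.one_mul, Nat.mul_comm c N]; omega
      have : ((j : Int) < (m : Int)) := by exact_mod_cast hjm
      rw [if_pos this, ← hX]
      rw [Int.ofNat_ediv_ofNat]
      simp [hdiv]
    · have hmj : m ≤ j := by omega
      have hc0 : c = 0 := pv_eq_zero_of_mul_lt (N := N) (by omega)
      have : ¬ ((j : Int) < (m : Int)) := by exact_mod_cast hjm
      rw [if_neg this, hc0]
  rw [hcB]
  unfold pvBucket
  rw [← hm, hlist, List.map_map, List.map_map]
  congr 1
  apply List.map_congr_left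
  intro k _
  simp only [Function.comp_apply]
  have hcast : (j : Int) + (N : Int) * (k : Int) = ((j + N * k : Nat) : Int) := by push_cast; ring
  rw [hcast, PySem.List.pyGetD_natCast]

-- final max scan: A's running max from a[0] is Python's max of the list
lemma pv_maxfold (x : Int) (t : List Int) :
    (x :: t).foldl (fun ans y => max y ans) (PySem.List.pyGetD (x :: t) 0 0)
      = (PySem.List.max? (x :: t) (fun y => y)).getD 0 := by
  rw [PySem.List.max?_id_cons]
  have h0 : PySem.List.pyGetD (x :: t) 0 0 = x := by
    simp [PySem.List.pyGetD, PySem.List.pyGet?, PySem.List.pyIdx?]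
  rw [h0, List.foldl_cons, max_self, Option.getD_some]
  exact PySem.List.foldl_congr_mem t _ _ x (fun acc y _ => max_comm y acc)

-- elements of zipIdx read back from the list
lemma pv_zipIdx_getD (l : List Int) (p : Int × Nat) (h : p ∈ l.zipIdx) :
    l.getD p.2 0 = p.1 := by
  obtain ⟨x, i⟩ := p
  obtain ⟨-, h2, h3⟩ := List.mem_zipIdx h
  simp at h2
  simp [List.getD, List.getElem?_eq_getElem h2, h3]

-- ===== VERDICT (by name: the statement is the Claim_ definition above) =====
theorem solution_spec : Claim_equal_solution := by
  intro time_table n _ hpre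
  unfold Pre_solution at hpre
  unfold Spec_solution
  lift n to ℕ using (by omega : (0:Int) ≤ n) with N
  have hN : 0 < N := by exact_mod_cast hpre
  unfold solution solution_alt
  simp only [PySem.List.pyRange_zero_natCast, List.map_map, Function.comp_def]
  have hA : time_table.zipIdx.foldl
      (fun a p =>
        a.set (PySem.Int.mod (p.2 : Int) (N : Int)).toNat
          (PySem.List.pyGetD a (PySem.Int.mod (p.2 : Int) (N : Int)) 0
            + PySem.List.pyGetD time_table (p.2 : Int) 0))
      ((List.range N).map (fun _ => (0:Int)))
      = (List.range N).map (fun j => pvBucket time_table N j) := by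
    rw [PySem.List.foldl_congr_mem _ _
      (fun a p => a.set (p.2 % N) (a.getD (p.2 % N) 0 + p.1)) _
      (by
        intro acc p hp
        have hread : PySem.List.pyGetD time_table (p.2 : Int) 0 = p.1 := by
          rw [PySem.List.pyGetD_natCast]
          exact pv_zipIdx_getD time_table p hp
        rw [hread, PySem.Int.mod_natCast, Int.toNat_natCast, PySem.List.pyGetD_natCast])]
    rw [pv_loopA N hN time_table]
    simp
  rw [hA]
  have hsums : (List.range N).map
      (fun j => ((PySem.List.pyRange ((j : Nat) : Int) ((time_table.length : Nat) : Int) ((N : Nat) : Int)).map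
          (fun i => PySem.List.pyGetD time_table i 0)).sum)
      = (List.range N).map (fun j => pvBucket time_table N j) := by
    apply List.map_congr_left
    intro j hj
    exact (pv_bucket_eq_stride time_table N j hN (List.mem_range.mp hj)).symm
  rw [hsums]
  obtain ⟨x, t, hxt⟩ : ∃ x t, (List.range N).map (fun j => pvBucket time_table N j) = x :: t := by
    cases hC : (List.range N).map (fun j => pvBucket time_table N j) with
    | nil => exfalso; have := congrArg List.length hC; simp at this; omega
    | cons x t => exact ⟨x, t, rfl⟩
  rw [hxt]
  exact pv_maxfold x t
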